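-- pv_equiv track=rewrite | github.com/pypi-data/pypi-mirror-391 | packages/format-dedent/format_dedent-0.1.0-py3-none-any.whl/format_dedent/formatter.py | format_string_content
-- ===== SOURCE A (Python) =====
-- import textwrap
--
-- def format_string_content(content: str, indent_level: int = 0) -> str:
--     """
--     Format the content of a string by indenting it properly.
--     The content will be indented to align with the opening quote.
--
--     Args:
--         content: The string content to format
--         indent_level: The target indentation level (in spaces) - aligns with the opening quote
--
--     Returns:
--         The formatted string with proper indentation
--     """
--     # First dedent to get the "real" content without any indentation
--     dedented = textwrap.dedent(content)
--
--     # Remove leading/trailing empty lines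
--     lines = dedented.split("\n")
--
--     # Find first and last non-empty lines
--     first_non_empty = 0
--     last_non_empty = len(lines) - 1
--
--     for i, line in enumerate(lines):
--         if line.strip():
--             first_non_empty = i
--             break
--
--     for i in range(len(lines) - 1, -1, -1):
--         if lines[i].strip():
--             last_non_empty = i
--             break
--
--     # Keep leading/trailing empty lines but process the content
--     result_lines = []
--     indent_str = " " * indent_level  # Use the exact indentation level passed
--
--     for i, line in enumerate(lines):
--         if i < first_non_empty or i > last_non_empty:
--             # Keep empty lines at start/end empty
--             result_lines.append("")
--         elif line.strip():
--             # Non-empty line: add indentation (preserve trailing whitespace)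
--             result_lines.append(indent_str + line)
--         else:
--             # Empty line in the middle: keep it empty
--             result_lines.append("")
--
--     return "\n".join(result_lines)
-- ===== SOURCE B (Python) =====
-- import textwrap
--
-- def format_string_content(content: str, indent_level: int = 0) -> str:
--     # Single scan over the dedented text itself: no line list, no first/last
--     # bookkeeping, no join -- walk from newline to newline with str.find and
--     # append directly to the output string.
--     dedented = textwrap.dedent(content)
--     prefix = " " * indent_level
--     result = ""
--     i = 0
--     while True:
--         j = dedented.find("\n", i)
--         line = dedented[i:] if j == -1 else dedented[i:j]
--         if line.strip():
--             result += prefix + line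
--         if j == -1:
--             return result
--         result += "\n"
--         i = j + 1
-- ===== Notes on version B (the rewrite author's own statement) =====
-- stated objective: alternative
-- what changed: B never builds a list of lines at all: instead of A's newline split, two scans locating the first/last non-empty line, a three-way indexed branch and a final join, B walks the dedented string once with str.find locating each next newline, slices each line out, and appends prefix+line or a blank line directly to a growing result string.
import Mathlib
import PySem

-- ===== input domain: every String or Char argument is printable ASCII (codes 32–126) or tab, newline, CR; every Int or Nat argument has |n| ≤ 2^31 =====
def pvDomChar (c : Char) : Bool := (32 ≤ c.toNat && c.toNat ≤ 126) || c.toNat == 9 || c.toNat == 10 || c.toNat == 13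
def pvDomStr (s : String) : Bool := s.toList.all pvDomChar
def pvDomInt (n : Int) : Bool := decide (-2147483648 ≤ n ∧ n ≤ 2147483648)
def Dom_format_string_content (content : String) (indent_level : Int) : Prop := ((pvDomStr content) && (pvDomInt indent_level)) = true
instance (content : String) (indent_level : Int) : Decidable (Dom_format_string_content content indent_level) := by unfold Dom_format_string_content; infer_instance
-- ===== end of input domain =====

-- B replaces A's split-into-lines / two index-finding scans / three-way branch / join
-- pipeline by a single find-the-next-newline scan over the dedented text with a string
-- accumulator (objective: simpler); outputs are identical.

-- ===== shared helper: textwrap.dedent, ported line-wise (both Pythons call it) =====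
-- space-or-tab test (textwrap's regexes use [ \t])
def pvWsChar (c : Char) : Bool := c == ' ' || c == '\t'

-- `_whitespace_only_re.sub('', text)`: a nonempty all-[ \t] line becomes '' (exact per line)
def pvBlankNorm (l : List Char) : List Char :=
  if l ≠ [] ∧ l.all pvWsChar then [] else l

-- `margin[:i]` at the first mismatch of `zip(margin, indent)` (the inner for/break loop)
def pvCommonPrefix : List Char → List Char → List Char
  | x :: xs, y :: ys => if x == y then x :: pvCommonPrefix xs ys else []
  | _, _ => []

-- one step of dedent's margin loop (branches in textwrap's order)
def pvUpdMargin (margin indent : List Char) : List Char :=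
  if PySem.Chars.startswith indent margin then margin
  else if PySem.Chars.startswith margin indent then indent
  else pvCommonPrefix margin indent

-- textwrap.dedent on the '\n'-split lines: normalize blank lines, collect the
-- `(^[ \t]*)(?:[^ \t\n])` captures (exact per line: the [ \t]-prefix of each line that has
-- a non-[ \t] char), fold the margin, then strip the margin off each line that starts with it
def pvDedentLines (lines0 : List (List Char)) : List (List Char) :=
  let lines := lines0.map pvBlankNorm
  let indents := (lines.filter (fun l => l.takeWhile pvWsChar ≠ l)).map (fun l => l.takeWhile pvWsChar)
  let margin : List Char := match indents with
    | [] => []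
    | i :: rest => rest.foldl pvUpdMargin i
  if margin ≠ [] then
    lines.map (fun l => if PySem.Chars.startswith l margin then l.drop margin.length else l)
  else lines

-- ===== PORT A =====
-- A's first break-loop / reversed-range break-loop: first index whose line.strip() is truthy
def pvFindNE : List (List Char) → Option Nat
  | [] => none
  | l :: ls => if (PySem.Chars.strip l).isEmpty then (pvFindNE ls).map (· + 1) else some 0

-- A's result loop with its three-way branch, carrying the running index i
def pvBuildA (indentStr : List Char) (first last : Nat) : List (List Char) → Nat → List (List Char)
  | [], _ => []
  | l :: ls, i =>
    (if i < first ∨ last < i then []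
     else if ¬ (PySem.Chars.strip l).isEmpty then indentStr ++ l
     else []) :: pvBuildA indentStr first last ls (i + 1)

def format_string_content (content : String) (indent_level : Int) : String :=
  let lines := pvDedentLines (PySem.Chars.splitOn content.toList ['\n'])
  let firstNE := (pvFindNE lines).getD 0
  let lastNE := match pvFindNE lines.reverse with
    | some j => lines.length - 1 - j
    | none => lines.length - 1
  let indentStr := PySem.List.pyRepeat [' '] indent_level
  String.ofList (PySem.Chars.join ['\n'] (pvBuildA indentStr firstNE lastNE lines 0))

-- ===== PORT B =====
-- B's while loop over the dedented text: `j = dedented.find('\n', i)` followed by the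
-- slice `dedented[i:j]` (or `dedented[i:]`) is, on the remaining suffix, take-until-the-
-- next-newline; `j == -1` is the case where the drop past the line is empty. Each step
-- appends to the result string exactly what B's loop body appends.
-- the loop-body append: '' for a blank line, prefix + line otherwise
def pvEmit (pre line : List Char) : List Char :=
  if (PySem.Chars.strip line).isEmpty then [] else pre ++ line

def pvLoopB (pre : List Char) (rest : List Char) : List Char :=
  match h : rest.drop ((rest.takeWhile (fun c => c != '\n')).length) with
  | [] => pvEmit pre (rest.takeWhile (fun c => c != '\n'))
  | _ :: tail => pvEmit pre (rest.takeWhile (fun c => c != '\n')) ++ '\n' :: pvLoopB pre tail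
termination_by rest.length
decreasing_by
  have := congrArg List.length h
  simp only [List.length_drop, List.length_cons] at this
  omega

def format_string_content_alt (content : String) (indent_level : Int) : String :=
  let dedented := PySem.Chars.join ['\n'] (pvDedentLines (PySem.Chars.splitOn content.toList ['\n']))
  String.ofList (pvLoopB (PySem.List.pyRepeat [' '] indent_level) dedented)

-- ===== PRECONDITION & SPEC =====
def Spec_format_string_content (content : String) (indent_level : Int) (out : String) : Prop := out = format_string_content_alt content indent_level
instance (content : String) (indent_level : Int) (out : String) : Decidable (Spec_format_string_content content indent_level out) := by unfold Spec_format_string_content; infer_instance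

-- ===== CLAIM (what is proved, stated in full; the proofs are below) =====
def Claim_equal_format_string_content : Prop := ∀ (content : String) (indent_level : Int), Dom_format_string_content content indent_level → Spec_format_string_content content indent_level (format_string_content content indent_level)

-- ===== LEMMAS AND PROOFS =====

-- pvFindNE points no later than any index whose line strips nonempty
theorem pvFindNE_le {ls : List (List Char)} {i : Nat} (hi : i < ls.length)
    (h : ¬ (PySem.Chars.strip ls[i]).isEmpty) : (pvFindNE ls).getD 0 ≤ i := by
  induction ls generalizing i with
  | nil => simp at hi
  | cons l ls ih =>
    unfold pvFindNE
    by_cases hl : (PySem.Chars.strip l).isEmpty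
    · cases i with
      | zero => simp only [List.getElem_cons_zero] at h; exact absurd hl h
      | succ i' =>
        simp only [hl, if_pos]
        have := ih (i := i') (by simpa using hi) (by simpa using h)
        cases hf : pvFindNE ls with
        | none => simp
        | some j => rw [hf] at this; simp only [Option.map_some, Option.getD_some] at this ⊢; omega
    · simp [hl]

-- A's result loop, when every non-blank line lies between first and last, is the plain
-- per-line map (blank ↦ '', non-blank ↦ indent ++ line)
theorem pvBuildA_eq (indentStr : List Char) (first last : Nat) (ls : List (List Char)) (i : Nat)
    (h : ∀ k, (hk : k < ls.length) → ¬ (PySem.Chars.strip ls[k]).isEmpty →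
      first ≤ i + k ∧ i + k ≤ last) :
    pvBuildA indentStr first last ls i =
      ls.map (fun line => if (PySem.Chars.strip line).isEmpty then [] else indentStr ++ line) := by
  induction ls generalizing i with
  | nil => rfl
  | cons l ls ih =>
    unfold pvBuildA
    simp only [List.map_cons, List.cons_eq_cons]
    refine ⟨?_, ?_⟩
    · by_cases hl : (PySem.Chars.strip l).isEmpty
      · simp [hl]
      · have := h 0 (by simp) (by simpa using hl)
        have hb : ¬ (i < first ∨ last < i) := by omega
        simp [hl, hb]
    · exact ih (i + 1) (fun k hk hne => by
        have := h (k + 1) (by simpa using Nat.succ_lt_succ hk) (by simpa using hne)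
        omega)

-- the unfolded equations of PySem.Chars.splitOn.go (its match is on (fuel, l))
theorem pvGo_nil (sep cur : List Char) (acc : List (List Char)) (fuel : Nat) :
    PySem.Chars.splitOn.go sep (fuel+1) [] cur acc = (cur.reverse :: acc).reverse := rfl
theorem pvGo_cons (sep cur : List Char) (acc : List (List Char)) (fuel : Nat) (c : Char) (rest : List Char) :
    PySem.Chars.splitOn.go sep (fuel+1) (c :: rest) cur acc =
      if sep.isPrefixOf (c :: rest) then
        PySem.Chars.splitOn.go sep fuel (List.drop sep.length (c :: rest)) [] (cur.reverse :: acc)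
      else PySem.Chars.splitOn.go sep fuel rest (c :: cur) acc := rfl

-- pieces produced by splitting on '\n' contain no '\n'
theorem pvGo_no_nl (fuel : Nat) : ∀ (l cur : List Char) (acc : List (List Char)),
    l.length < fuel → (∀ p ∈ acc, '\n' ∉ p) → '\n' ∉ cur →
    ∀ p ∈ PySem.Chars.splitOn.go ['\n'] fuel l cur acc, '\n' ∉ p := by
  induction fuel with
  | zero => intro l cur acc h; omega
  | succ fuel ih =>
    intro l cur acc hlen hacc hcur p hp
    match l with
    | [] =>
      rw [pvGo_nil] at hp
      simp only [List.mem_reverse, List.mem_cons] at hp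
      rcases hp with h | h
      · subst h; simpa using hcur
      · exact hacc p h
    | c :: rest =>
      rw [pvGo_cons] at hp
      by_cases hpre : List.isPrefixOf ['\n'] (c :: rest)
      · simp only [hpre, if_true] at hp
        refine ih _ _ _ (by simp at hlen ⊢; omega) ?_ (by simp) p hp
        intro q hq
        rcases List.mem_cons.mp hq with h | h
        · subst h; simpa using hcur
        · exact hacc q h
      · simp only [hpre] at hp
        refine ih rest (c :: cur) acc (by simp at hlen ⊢; omega) hacc ?_ p hp
        intro hmem
        rcases List.mem_cons.mp hmem with h | h
        · exact hpre (by simp [List.isPrefixOf, ← h])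
        · exact hcur h

theorem pvSplitOn_no_nl (s : List Char) : ∀ p ∈ PySem.Chars.splitOn s ['\n'], '\n' ∉ p := by
  unfold PySem.Chars.splitOn
  exact pvGo_no_nl _ _ _ _ (by omega) (by simp) (by simp)

-- dedenting only blanks or shortens lines, so it introduces no '\n'
theorem pvDedentLines_no_nl (ls : List (List Char)) (h : ∀ p ∈ ls, '\n' ∉ p) :
    ∀ p ∈ pvDedentLines ls, '\n' ∉ p := by
  have hbn : ∀ p ∈ ls.map pvBlankNorm, '\n' ∉ p := by
    intro p hp
    rcases List.mem_map.mp hp with ⟨q, hq, rfl⟩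
    unfold pvBlankNorm
    split
    · simp
    · exact h q hq
  intro p hp
  unfold pvDedentLines at hp
  simp only [] at hp
  split at hp <;> split at hp <;>
    first
      | exact hbn p hp
      | (rcases List.mem_map.mp hp with ⟨q, hq, rfl⟩
         split
         · intro hc; exact hbn q hq (List.mem_of_mem_drop hc)
         · exact hbn q hq)

-- one step of B's scan: a newline-free first line, nothing after it
theorem pvTakeWhile_no_nl (l rest : List Char) (hl : '\n' ∉ l) :
    (l ++ '\n' :: rest).takeWhile (fun c => c != '\n') = l := by
  induction l with
  | nil => simp
  | cons c l' ih =>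
    have hc : c ≠ '\n' := fun h => hl (by simp [h])
    have hl' : '\n' ∉ l' := fun h => hl (List.mem_cons_of_mem _ h)
    simpa [List.takeWhile_cons, hc] using ih hl'

theorem pvLoopB_single (pre l : List Char) (hl : '\n' ∉ l) :
    pvLoopB pre l = pvEmit pre l := by
  have htake : l.takeWhile (fun c => c != '\n') = l := by
    rw [List.takeWhile_eq_self_iff]
    intro a ha
    simp only [bne_iff_ne, ne_eq]
    intro hc; exact hl (hc ▸ ha)
  unfold pvLoopB
  split
  · rw [htake]
  · rename_i heq
    rw [htake, List.drop_length] at heq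
    exact absurd heq (by simp)

theorem pvLoopB_step (pre l rest : List Char) (hl : '\n' ∉ l) :
    pvLoopB pre (l ++ '\n' :: rest) =
      pvEmit pre l ++ '\n' :: pvLoopB pre rest := by
  have htake := pvTakeWhile_no_nl l rest hl
  conv_lhs => rw [pvLoopB]
  split
  · rename_i heq
    rw [htake, List.drop_left] at heq
    exact absurd heq (by simp)
  · rename_i head tail heq
    rw [htake, List.drop_left] at heq
    obtain ⟨rfl, rfl⟩ : '\n' = head ∧ rest = tail := by
      constructor <;> [exact (List.cons.injEq .. ▸ heq).1; exact (List.cons.injEq .. ▸ heq).2]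
    rw [htake]

-- B's scan over the joined lines IS the per-line map, when no line contains '\n'
theorem pvLoopB_join (pre : List Char) (ls : List (List Char)) (h : ∀ p ∈ ls, '\n' ∉ p) :
    pvLoopB pre (PySem.Chars.join ['\n'] ls) =
      PySem.Chars.join ['\n'] (ls.map (pvEmit pre)) := by
  induction ls with
  | nil =>
    unfold pvLoopB
    rfl
  | cons l ls ih =>
    have hl : '\n' ∉ l := h l (List.mem_cons_self ..)
    cases ls with
    | nil =>
      rw [PySem.Chars.join_singleton, pvLoopB_single pre l hl, List.map_cons, List.map_nil,
        PySem.Chars.join_singleton]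
    | cons l2 ls2 =>
      rw [PySem.Chars.join_cons_cons]
      have hjoin : l ++ ['\n'] ++ PySem.Chars.join ['\n'] (l2 :: ls2)
          = l ++ '\n' :: PySem.Chars.join ['\n'] (l2 :: ls2) := by simp
      rw [hjoin, pvLoopB_step pre l _ hl, ih (fun p hp => h p (List.mem_cons_of_mem _ hp))]
      simp [PySem.Chars.join_cons_cons]

-- ===== VERDICT (by name: the statement is the Claim_ definition above) =====
theorem format_string_content_spec : Claim_equal_format_string_content := by
  intro content indent_level _
  unfold Spec_format_string_content format_string_content format_string_content_alt
  simp only []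
  set lines := pvDedentLines (PySem.Chars.splitOn content.toList ['\n']) with hlines
  have hnl : ∀ p ∈ lines, '\n' ∉ p :=
    pvDedentLines_no_nl _ (pvSplitOn_no_nl content.toList)
  rw [pvLoopB_join _ _ hnl]
  congr 1
  congr 1
  apply pvBuildA_eq
  intro k hk hne
  constructor
  · simpa using pvFindNE_le hk hne
  · have hlen : lines.reverse.length = lines.length := by simp
    have hkl : k < lines.length := hk
    have hk2 : lines.length - 1 - k < lines.reverse.length := by omega
    have hrev : ¬ (PySem.Chars.strip (lines.reverse[lines.length - 1 - k]'hk2)).isEmpty := by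
      have hidx : lines.reverse[lines.length - 1 - k]'hk2 = lines[k] := by
        rw [List.getElem_reverse]
        congr 1
        omega
      rw [hidx]; exact hne
    have hfle := pvFindNE_le (ls := lines.reverse) hk2 hrev
    cases hf : pvFindNE lines.reverse with
    | none => simp only [Nat.zero_add]; exact (by omega : k ≤ lines.length - 1)
    | some j =>
      rw [hf] at hfle
      simp only [Option.getD_some] at hfle
      simp only [Nat.zero_add]; exact (by omega : k ≤ lines.length - 1 - j)
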